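-- pv_equiv track=rewrite | github.com/alleydog/csv | csv.py | resort
-- ===== SOURCE A (Python) =====
-- def resort(source_id, j=0):
--     if j >= len(source_id) - 1:
--         return source_id
--     for i in range(j + 1, len(source_id)):
--         if set(source_id[i]) & set(source_id[j]):
--             source_id[j] = sorted(list(set(source_id.pop(i)) | set(source_id[j])))
--             return resort(source_id, j)
--     return resort(source_id, j + 1)
-- ===== SOURCE B (Python) =====
-- def resort(source_id, j=0):
--     # One reversed pass grouping entries into overlap-components (no recursion,
--     # no pops/rescans). Mutates source_id[j:] in place like A and returns it.
--     if j >= len(source_id) - 1: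
--         return source_id
--     groups = []  # (elems, merged, item): components of the processed suffix, earliest-first
--     for item in reversed(source_id[j:]):
--         s = set(item)
--         absorbed = set(s)
--         merged = False
--         kept = []
--         for es, fl, it in groups:
--             if es & s:
--                 absorbed |= es
--                 merged = True
--             else:
--                 kept.append((es, fl, it))
--         groups = [(absorbed, merged, item)] + kept
--     source_id[j:] = [sorted(es) if fl else it for es, fl, it in groups]
--     return source_id
-- ===== Notes on version B (the rewrite author's own statement) =====
-- stated objective: alternative
-- what changed: A recursively rescans from position j, popping and re-merging (restarting the scan after each merge); B instead makes one reversed pass over the tail, maintaining the overlap-components as (element-set, merged-flag, item) groups and absorbing in a single inner scan per item, then renders each group once.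
-- outside the precondition, e.g. on resort([[4], [4, 1, 0], []], -1): A returns [[0, 1, 4], []], B returns [[4], [4, 1, 0], []]
import Mathlib
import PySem

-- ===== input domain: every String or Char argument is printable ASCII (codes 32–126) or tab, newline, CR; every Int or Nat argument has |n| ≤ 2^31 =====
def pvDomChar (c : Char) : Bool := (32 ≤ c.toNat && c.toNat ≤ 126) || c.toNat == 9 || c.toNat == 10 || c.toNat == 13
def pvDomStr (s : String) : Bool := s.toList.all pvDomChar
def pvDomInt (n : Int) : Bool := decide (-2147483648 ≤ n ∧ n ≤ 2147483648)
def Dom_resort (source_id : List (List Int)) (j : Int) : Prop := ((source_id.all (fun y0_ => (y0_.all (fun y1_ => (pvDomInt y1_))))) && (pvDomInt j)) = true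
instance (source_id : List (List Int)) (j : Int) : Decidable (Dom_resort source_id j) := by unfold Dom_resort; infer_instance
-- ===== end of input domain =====

-- B replaces A's pop-and-rescan recursion by a single reversed pass that maintains the
-- overlap-components as (element-set, merged-flag, item) groups (objective: alternative).
-- Both Pythons mutate source_id in place; the equivalence proved here is about the return value.

-- ===== PORT A =====

-- truthiness of 'set(a) & set(b)'
def pvOverlap (a b : List Int) : Bool :=
  !(PySem.Set.inter (PySem.Set.ofList a) (PySem.Set.ofList b)).isEmpty

-- the 'for i in range(j+1, len(source_id))' scan: first i whose entry overlaps entry j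
def resortFind (s : List (List Int)) (j : Int) : List Int → Option Int
  | [] => none
  | i :: rest =>
    match PySem.List.pyGet? s i, PySem.List.pyGet? s j with
    | some a, some b => if pvOverlap a b then some i else resortFind s j rest
    | _, _ => resortFind s j rest   -- Python raises IndexError here; unreachable under Pre_

-- 'source_id[j] = v' (Python raises when j is out of range; that case is unreachable under Pre_)
def pvSetIdx (s : List (List Int)) (i : Int) (v : List Int) : List (List Int) :=
  s.set (if 0 ≤ i then i.toNat else s.length - (-i).toNat) v

def resort (source_id : List (List Int)) (j : Int) : List (List Int) :=
  if (source_id.length : Int) - 1 ≤ j then source_id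
  else
    match hf : resortFind source_id j (PySem.List.pyRange (j + 1) source_id.length 1) with
    | some i =>
      match hp : PySem.List.pop? source_id i with
      | some xs₁ =>
        match PySem.List.pyGet? xs₁.2 j with
        | some hj =>
          resort (pvSetIdx xs₁.2 j
            (PySem.List.sorted
              (PySem.Set.union (PySem.Set.ofList xs₁.1) (PySem.Set.ofList hj))
              (fun v => v) false)) j
        | none => xs₁.2   -- Python IndexError; unreachable under Pre_
      | none => source_id -- Python IndexError; unreachable under Pre_
    | none => resort source_id (j + 1)
termination_by (source_id.length, ((source_id.length : Int) - j).toNat)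
decreasing_by
  · have hl := PySem.List.length_of_pop?_eq_some (h := hp)
    apply Prod.Lex.left
    simp [pvSetIdx, List.length_set]
    omega
  · apply Prod.Lex.right
    omega

-- ===== PORT B =====

-- state of B's inner scan: (absorbed, merged, kept)
def bInsert (groups : List (PySem.Set Int × Bool × List Int)) (item : List Int) :
    List (PySem.Set Int × Bool × List Int) :=
  let s := PySem.Set.ofList item
  let r := groups.foldl
    (fun (acc : PySem.Set Int × Bool × List (PySem.Set Int × Bool × List Int)) g =>
      if !(PySem.Set.inter g.1 s).isEmpty then (PySem.Set.union acc.1 g.1, true, acc.2.2)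
      else (acc.1, acc.2.1, acc.2.2 ++ [g]))
    (s, false, [])
  (r.1, r.2.1, item) :: r.2.2

def bRender (g : PySem.Set Int × Bool × List Int) : List Int :=
  if g.2.1 then PySem.List.sorted g.1 (fun v => v) false else g.2.2

def resort_alt (source_id : List (List Int)) (j : Int) : List (List Int) :=
  if (source_id.length : Int) - 1 ≤ j then source_id
  else
    let tail := PySem.List.slice source_id (some j) none
    let groups := tail.reverse.foldl bInsert []
    PySem.List.slice source_id none (some j) ++ groups.map bRender

-- ===== PRECONDITION & SPEC =====
-- Pre_ restricts j to the natural domain of the cursor parameter (0 in intended use):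
-- on negative j, A's negative-index wraparound either raises IndexError mid-merge or
-- returns values shaped by the wraparound, which B's slice-based tail does not mimic.
def Pre_resort (source_id : List (List Int)) (j : Int) : Prop := 0 ≤ j
instance (source_id : List (List Int)) (j : Int) : Decidable (Pre_resort source_id j) := by
  unfold Pre_resort; infer_instance

def pvWitness_resort : List (List Int) × Int := ([[1, 2], [2, 3], [7]], 0)

def Spec_resort (source_id : List (List Int)) (j : Int) (out : List (List Int)) : Prop := out = resort_alt source_id j
instance (source_id : List (List Int)) (j : Int) (out : List (List Int)) : Decidable (Spec_resort source_id j out) := by unfold Spec_resort; infer_instance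

-- ===== CLAIM (what is proved, stated in full; the proofs are below) =====
def Claim_equal_resort : Prop := ∀ (source_id : List (List Int)) (j : Int), Dom_resort source_id j → Pre_resort source_id j → Spec_resort source_id j (resort source_id j)

-- ===== LEMMAS AND PROOFS =====

-- proof-side view of B's fold state -----------------------------------------

-- does group g share an element with set s?
def tchS (s : PySem.Set Int) (g : PySem.Set Int × Bool × List Int) : Bool :=
  !(PySem.Set.inter g.1 s).isEmpty

def unionAll (e : PySem.Set Int) (gs : List (PySem.Set Int × Bool × List Int)) : PySem.Set Int :=
  gs.foldl (fun e g => PySem.Set.union e g.1) e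

-- B's group state, built from the right (= the reversed-foldl of the port)
def bGroups (l : List (List Int)) : List (PySem.Set Int × Bool × List Int) :=
  l.foldr (fun it gs => bInsert gs it) []

lemma tchS_iff (s : PySem.Set Int) (g : PySem.Set Int × Bool × List Int) :
    tchS s g = true ↔ ∃ a, a ∈ g.1 ∧ a ∈ s := by
  constructor
  · intro h
    have hne : PySem.Set.inter g.1 s ≠ [] := by
      simp [tchS] at h
      simpa [List.isEmpty_iff] using h
    obtain ⟨a, ha⟩ := List.exists_mem_of_ne_nil _ hne
    exact ⟨a, (PySem.Set.mem_inter g.1 s a).1 ha⟩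
  · rintro ⟨a, h1, h2⟩
    have : a ∈ PySem.Set.inter g.1 s := (PySem.Set.mem_inter g.1 s a).2 ⟨h1, h2⟩
    simp [tchS, List.isEmpty_iff]
    intro hc
    simp [hc] at this

lemma bfold_eq (s : PySem.Set Int) (gs : List (PySem.Set Int × Bool × List Int))
    (e : PySem.Set Int) (f : Bool) (k : List (PySem.Set Int × Bool × List Int)) :
    gs.foldl
      (fun (acc : PySem.Set Int × Bool × List (PySem.Set Int × Bool × List Int)) g =>
        if !(PySem.Set.inter g.1 s).isEmpty then (PySem.Set.union acc.1 g.1, true, acc.2.2)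
        else (acc.1, acc.2.1, acc.2.2 ++ [g]))
      (e, f, k)
    = (unionAll e (gs.filter (tchS s)), f || gs.any (tchS s),
       k ++ gs.filter (fun g => !(tchS s g))) := by
  induction gs generalizing e f k with
  | nil => simp [unionAll]
  | cons g gs ih =>
    have hcond : (!(PySem.Set.inter g.1 s).isEmpty) = tchS s g := rfl
    rw [List.foldl_cons, hcond]
    by_cases hg : tchS s g = true
    · rw [if_pos hg, ih]
      simp only [List.filter_cons, List.any_cons, hg, if_true, Bool.true_or, Bool.or_true, Bool.or_assoc]
      rfl
    · rw [if_neg (by simp [hg]), ih]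
      have hg' : tchS s g = false := by simpa using hg
      simp [List.filter_cons, List.any_cons, hg']

lemma bInsert_eq (gs : List (PySem.Set Int × Bool × List Int)) (item : List Int) :
    bInsert gs item
    = (unionAll (PySem.Set.ofList item) (gs.filter (tchS (PySem.Set.ofList item))),
       gs.any (tchS (PySem.Set.ofList item)), item)
      :: gs.filter (fun g => !(tchS (PySem.Set.ofList item) g)) := by
  show (fun r => (r.1, r.2.1, item) :: r.2.2)
      (gs.foldl
        (fun (acc : PySem.Set Int × Bool × List (PySem.Set Int × Bool × List Int)) g =>
          if !(PySem.Set.inter g.1 (PySem.Set.ofList item)).isEmpty then (PySem.Set.union acc.1 g.1, true, acc.2.2)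
          else (acc.1, acc.2.1, acc.2.2 ++ [g]))
        (PySem.Set.ofList item, false, [])) = _
  rw [bfold_eq]
  simp

lemma mem_unionAll (a : Int) (e : PySem.Set Int) (gs : List (PySem.Set Int × Bool × List Int)) :
    a ∈ unionAll e gs ↔ a ∈ e ∨ ∃ g ∈ gs, a ∈ g.1 := by
  induction gs generalizing e with
  | nil => simp [unionAll]
  | cons g gs ih =>
    have h1 : unionAll e (g :: gs) = unionAll (PySem.Set.union e g.1) gs := rfl
    rw [h1, ih]
    constructor
    · rintro (h | h)
      · rcases (PySem.Set.mem_union e g.1 a).1 h with h' | h'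
        · exact Or.inl h'
        · exact Or.inr ⟨g, List.mem_cons_self .., h'⟩
      · exact Or.inr (by rcases h with ⟨g', hg', ha⟩; exact ⟨g', List.mem_cons_of_mem _ hg', ha⟩)
    · rintro (h | ⟨g', hg', ha⟩)
      · exact Or.inl ((PySem.Set.mem_union e g.1 a).2 (Or.inl h))
      · rcases List.mem_cons.1 hg' with heq | hg'
        · exact Or.inl ((PySem.Set.mem_union e g.1 a).2 (Or.inr (heq ▸ ha)))
        · exact Or.inr ⟨g', hg', ha⟩

lemma nodup_unionAll (e : PySem.Set Int) (gs : List (PySem.Set Int × Bool × List Int))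
    (he : e.Nodup) : (unionAll e gs).Nodup := by
  induction gs generalizing e with
  | nil => exact he
  | cons g gs ih =>
    have h1 : unionAll e (g :: gs) = unionAll (PySem.Set.union e g.1) gs := rfl
    rw [h1]
    exact ih _ (PySem.Set.nodup_union e g.1 he)

-- the four structural invariants of B's group state
lemma bGroups_inv (l : List (List Int)) :
    (∀ g ∈ bGroups l, g.1.Nodup)
    ∧ (∀ g ∈ bGroups l, ∀ a ∈ g.1, ∃ it ∈ l, a ∈ it)
    ∧ (bGroups l).Pairwise (fun g g' => ∀ a, a ∈ g.1 → a ∉ g'.1)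
    ∧ (∀ it ∈ l, ∃ g ∈ bGroups l, ∀ a, a ∈ it → a ∈ g.1) := by
  induction l with
  | nil => simp [bGroups]
  | cons y l ih =>
    obtain ⟨nod, cov, dis, itm⟩ := ih
    have hG : bGroups (y :: l) = bInsert (bGroups l) y := rfl
    rw [hG, bInsert_eq]
    refine ⟨?_, ?_, ?_, ?_⟩
    · intro g hg
      rcases List.mem_cons.1 hg with heq | hg
      · rw [heq]
        exact nodup_unionAll _ _ (PySem.Set.nodup_ofList y)
      · exact nod g (List.mem_of_mem_filter hg)
    · intro g hg
      rcases List.mem_cons.1 hg with heq | hg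
      · rw [heq]
        intro a ha
        rcases (mem_unionAll a _ _).1 ha with h | ⟨g', hg', ha'⟩
        · exact ⟨y, List.mem_cons_self .., (PySem.Set.mem_ofList y a).1 h⟩
        · obtain ⟨it, hit, hait⟩ := cov g' (List.mem_of_mem_filter hg') a ha'
          exact ⟨it, List.mem_cons_of_mem _ hit, hait⟩
      · intro a ha
        obtain ⟨it, hit, hait⟩ := cov g (List.mem_of_mem_filter hg) a ha
        exact ⟨it, List.mem_cons_of_mem _ hit, hait⟩
    · refine List.pairwise_cons.2 ⟨?_, ?_⟩
      · intro g' hg' a ha hc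
        have h2 := List.of_mem_filter hg'
        have hg'm := List.mem_of_mem_filter hg'
        rcases (mem_unionAll a _ _).1 ha with h | ⟨g'', hg'', ha''⟩
        · have : tchS (PySem.Set.ofList y) g' = true := (tchS_iff _ g').2 ⟨a, hc, h⟩
          simp [this] at h2
        · have h1 := List.of_mem_filter hg''
          have hg''m := List.mem_of_mem_filter hg''
          have hne : g'' ≠ g' := by
            intro h; rw [h] at h1; simp [h1] at h2
          have hsymm : Symmetric (fun (g g' : PySem.Set Int × Bool × List Int) => ∀ a, a ∈ g.1 → a ∉ g'.1) := by
            intro u v h a hav hau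
            exact h a hau hav
          exact (List.Pairwise.forall hsymm dis) hg''m hg'm hne a ha'' hc
      · exact List.Pairwise.sublist (List.filter_sublist) dis
    · intro it hit
      rcases List.mem_cons.1 hit with heq | hit
      · refine ⟨_, List.mem_cons_self .., ?_⟩
        intro a ha
        exact (mem_unionAll a _ _).2 (Or.inl ((PySem.Set.mem_ofList y a).2 (heq ▸ ha)))
      · obtain ⟨g, hg, hsub⟩ := itm it hit
        by_cases ht : tchS (PySem.Set.ofList y) g = true
        · refine ⟨_, List.mem_cons_self .., ?_⟩
          intro a ha
          exact (mem_unionAll a _ _).2 (Or.inr ⟨g, List.mem_filter_of_mem hg ht, hsub a ha⟩)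
        · exact ⟨g, List.mem_cons_of_mem _ (List.mem_filter_of_mem hg (by simp [ht])), hsub⟩

lemma pvFilterSwap (l : List (PySem.Set Int × Bool × List Int))
    (p q : (PySem.Set Int × Bool × List Int) → Bool) :
    (l.filter p).filter q = (l.filter q).filter p := by
  rw [List.filter_filter, List.filter_filter]
  exact List.filter_congr (fun a _ => by rw [Bool.and_comm])

lemma pvAnyOfFilterEq (l m : List (PySem.Set Int × Bool × List Int))
    (p : (PySem.Set Int × Bool × List Int) → Bool)
    (h : l.filter p = m.filter p) : l.any p = m.any p := by
  rw [Bool.eq_iff_iff, List.any_eq_true, List.any_eq_true]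
  constructor
  · rintro ⟨g, hg, hp⟩
    have : g ∈ m.filter p := h ▸ List.mem_filter_of_mem hg hp
    exact ⟨g, List.mem_of_mem_filter this, hp⟩
  · rintro ⟨g, hg, hp⟩
    have : g ∈ l.filter p := h.symm ▸ List.mem_filter_of_mem hg hp
    exact ⟨g, List.mem_of_mem_filter this, hp⟩

-- the group of an item is unique: any group sharing an element with x IS x's group
lemma touched_unique (l : List (List Int)) (x : List Int) (hxl : x ∈ l) :
    ∃ g0 ∈ bGroups l, (∀ a ∈ x, a ∈ g0.1) ∧
      ∀ g ∈ bGroups l, tchS (PySem.Set.ofList x) g = true → g = g0 := by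
  obtain ⟨nod, cov, dis, itm⟩ := bGroups_inv l
  obtain ⟨g0, hg0, hsub⟩ := itm x hxl
  refine ⟨g0, hg0, hsub, ?_⟩
  intro g hg ht
  obtain ⟨a, hag, hax⟩ := (tchS_iff _ g).1 ht
  have hax' : a ∈ x := (PySem.Set.mem_ofList x a).1 hax
  by_contra hne
  have hsymm : Symmetric (fun (g g' : PySem.Set Int × Bool × List Int) => ∀ a, a ∈ g.1 → a ∉ g'.1) := by
    intro u v h a hav hau
    exact h a hau hav
  exact (List.Pairwise.forall hsymm dis) hg hg0 hne a hag (hsub a hax')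

-- removing one member x of a component: the untouched groups are unchanged and the
-- elements of x's component are x's plus those of the directly-x-touching groups
lemma pvRem (x : List Int) (b0 : Int) (hb0 : b0 ∈ x) :
    ∀ l1 l2 : List (List Int),
      ((bGroups (l1 ++ x :: l2)).filter (fun g => !tchS (PySem.Set.ofList x) g)
        = (bGroups (l1 ++ l2)).filter (fun g => !tchS (PySem.Set.ofList x) g))
      ∧ (∀ a : Int,
          (∃ g ∈ bGroups (l1 ++ x :: l2), tchS (PySem.Set.ofList x) g = true ∧ a ∈ g.1)
          ↔ (a ∈ x ∨ ∃ g ∈ bGroups (l1 ++ l2), tchS (PySem.Set.ofList x) g = true ∧ a ∈ g.1)) := by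
  intro l1
  induction l1 with
  | nil =>
    intro l2
    simp only [List.nil_append]
    rw [show bGroups (x :: l2) = bInsert (bGroups l2) x from rfl, bInsert_eq]
    have hb0s : b0 ∈ PySem.Set.ofList x := (PySem.Set.mem_ofList x b0).2 hb0
    have hhead : tchS (PySem.Set.ofList x)
        (unionAll (PySem.Set.ofList x) ((bGroups l2).filter (tchS (PySem.Set.ofList x))),
         (bGroups l2).any (tchS (PySem.Set.ofList x)), x) = true :=
      (tchS_iff _ _).2 ⟨b0, (mem_unionAll _ _ _).2 (Or.inl hb0s), hb0s⟩
    constructor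
    · rw [List.filter_cons]
      simp only [hhead, Bool.not_true]
      rw [if_neg (by simp), List.filter_filter]
      exact (List.filter_congr (fun g _ => by cases tchS (PySem.Set.ofList x) g <;> simp))
    · intro a
      constructor
      · rintro ⟨g, hg, htx, ha⟩
        rcases List.mem_cons.1 hg with heq | hgf
        · rw [heq] at ha
          rcases (mem_unionAll a _ _).1 ha with h | ⟨g', hg', ha'⟩
          · exact Or.inl ((PySem.Set.mem_ofList x a).1 h)
          · exact Or.inr ⟨g', List.mem_of_mem_filter hg', List.of_mem_filter hg', ha'⟩
        · have := List.of_mem_filter hgf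
          rw [htx] at this
          cases this
      · rintro (hax | ⟨g, hg, htx, ha⟩)
        · exact ⟨_, List.mem_cons_self .., hhead,
            (mem_unionAll a _ _).2 (Or.inl ((PySem.Set.mem_ofList x a).2 hax))⟩
        · exact ⟨_, List.mem_cons_self .., hhead,
            (mem_unionAll a _ _).2 (Or.inr ⟨g, List.mem_filter_of_mem hg htx, ha⟩)⟩
  | cons y l1 ih =>
    intro l2
    obtain ⟨R1, R2⟩ := ih l2
    obtain ⟨nodL, covL, disL, itmL⟩ := bGroups_inv (l1 ++ x :: l2)
    obtain ⟨g0, hg0m, hg0sub, hg0uniq⟩ := touched_unique (l1 ++ x :: l2) x (by simp)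
    have hb0s : b0 ∈ PySem.Set.ofList x := (PySem.Set.mem_ofList x b0).2 hb0
    have hg0tx : tchS (PySem.Set.ofList x) g0 = true := (tchS_iff _ _).2 ⟨b0, hg0sub b0 hb0, hb0s⟩
    have hE0 : ∀ a, a ∈ g0.1 ↔ (a ∈ x ∨ ∃ g ∈ bGroups (l1 ++ l2), tchS (PySem.Set.ofList x) g = true ∧ a ∈ g.1) := by
      intro a
      constructor
      · intro ha
        exact (R2 a).1 ⟨g0, hg0m, hg0tx, ha⟩
      · intro h
        obtain ⟨g, hg, htx, ha⟩ := (R2 a).2 h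
        rw [hg0uniq g hg htx] at ha
        exact ha
    have hTY : ∀ g ∈ bGroups (l1 ++ l2), tchS (PySem.Set.ofList x) g = true →
        tchS (PySem.Set.ofList y) g = true → tchS (PySem.Set.ofList y) g0 = true := by
      intro g hg htx hty
      obtain ⟨a, hag, hay⟩ := (tchS_iff _ _).1 hty
      exact (tchS_iff _ _).2 ⟨a, (hE0 a).2 (Or.inr ⟨g, hg, htx, hag⟩), hay⟩
    have hXY : (∃ a, a ∈ x ∧ a ∈ PySem.Set.ofList y) → tchS (PySem.Set.ofList y) g0 = true := by
      rintro ⟨a, hax, hay⟩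
      exact (tchS_iff _ _).2 ⟨a, hg0sub a hax, hay⟩
    rw [show bGroups ((y :: l1) ++ x :: l2) = bInsert (bGroups (l1 ++ x :: l2)) y from rfl,
        show bGroups ((y :: l1) ++ l2) = bInsert (bGroups (l1 ++ l2)) y from rfl,
        bInsert_eq, bInsert_eq]
    by_cases hbb : tchS (PySem.Set.ofList y) g0 = true
    · -- y's entry touches x's component
      have hheadL : tchS (PySem.Set.ofList x)
          (unionAll (PySem.Set.ofList y) ((bGroups (l1 ++ x :: l2)).filter (tchS (PySem.Set.ofList y))),
           (bGroups (l1 ++ x :: l2)).any (tchS (PySem.Set.ofList y)), y) = true :=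
        (tchS_iff _ _).2 ⟨b0, (mem_unionAll _ _ _).2
          (Or.inr ⟨g0, List.mem_filter_of_mem hg0m hbb, hg0sub b0 hb0⟩), hb0s⟩
      have hheadR : tchS (PySem.Set.ofList x)
          (unionAll (PySem.Set.ofList y) ((bGroups (l1 ++ l2)).filter (tchS (PySem.Set.ofList y))),
           (bGroups (l1 ++ l2)).any (tchS (PySem.Set.ofList y)), y) = true := by
        obtain ⟨a, hag0, hay⟩ := (tchS_iff _ _).1 hbb
        rcases (hE0 a).1 hag0 with hax | ⟨g, hgm, htx, hag⟩
        · exact (tchS_iff _ _).2 ⟨a, (mem_unionAll _ _ _).2 (Or.inl hay),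
            (PySem.Set.mem_ofList x a).2 hax⟩
        · have hty : tchS (PySem.Set.ofList y) g = true := (tchS_iff _ _).2 ⟨a, hag, hay⟩
          obtain ⟨c, hcg, hcx⟩ := (tchS_iff _ _).1 htx
          exact (tchS_iff _ _).2 ⟨c, (mem_unionAll _ _ _).2
            (Or.inr ⟨g, List.mem_filter_of_mem hgm hty, hcg⟩), hcx⟩
      constructor
      · rw [List.filter_cons, List.filter_cons]
        rw [if_neg (by simp [hheadL]), if_neg (by simp [hheadR])]
        rw [pvFilterSwap, R1, pvFilterSwap]
      · intro a
        constructor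
        · rintro ⟨g, hg, htx, ha⟩
          rcases List.mem_cons.1 hg with heq | hgf
          · rw [heq] at ha
            rcases (mem_unionAll a _ _).1 ha with hay | ⟨g', hg', ha'⟩
            · -- a ∈ y's set: y touches x's component on the right too
              refine Or.inr ⟨_, List.mem_cons_self .., hheadR, (mem_unionAll a _ _).2 (Or.inl hay)⟩
            · have hty' := List.of_mem_filter hg'
              have hg'm := List.mem_of_mem_filter hg'
              by_cases htx' : tchS (PySem.Set.ofList x) g' = true
              · have := hg0uniq g' hg'm htx'
                rw [this] at ha'
                rcases (hE0 a).1 ha' with hax | ⟨g'', hg''m, htx'', ha''⟩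
                · exact Or.inl hax
                · by_cases hty'' : tchS (PySem.Set.ofList y) g'' = true
                  · exact Or.inr ⟨_, List.mem_cons_self .., hheadR,
                      (mem_unionAll a _ _).2 (Or.inr ⟨g'', List.mem_filter_of_mem hg''m hty'', ha''⟩)⟩
                  · exact Or.inr ⟨g'', List.mem_cons_of_mem _
                      (List.mem_filter_of_mem hg''m (by simp [hty''])), htx'', ha''⟩
              · have hgmem : g' ∈ (bGroups (l1 ++ l2)).filter (fun g => !tchS (PySem.Set.ofList x) g) := by
                  rw [← R1]
                  exact List.mem_filter_of_mem hg'm (by simp [htx'])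
                exact Or.inr ⟨_, List.mem_cons_self .., hheadR,
                  (mem_unionAll a _ _).2 (Or.inr ⟨g', List.mem_filter_of_mem
                    (List.mem_of_mem_filter hgmem) hty', ha'⟩)⟩
          · have htyf := List.of_mem_filter hgf
            have hgm := List.mem_of_mem_filter hgf
            have := hg0uniq g hgm htx
            rw [this] at htyf
            rw [hbb] at htyf
            cases htyf
        · rintro (hax | ⟨g, hg, htx, ha⟩)
          · exact ⟨_, List.mem_cons_self .., hheadL,
              (mem_unionAll a _ _).2 (Or.inr ⟨g0, List.mem_filter_of_mem hg0m hbb, hg0sub a hax⟩)⟩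
          · rcases List.mem_cons.1 hg with heq | hgf
            · rw [heq] at ha
              rcases (mem_unionAll a _ _).1 ha with hay | ⟨g', hg', ha'⟩
              · exact ⟨_, List.mem_cons_self .., hheadL, (mem_unionAll a _ _).2 (Or.inl hay)⟩
              · have hty' := List.of_mem_filter hg'
                have hg'm := List.mem_of_mem_filter hg'
                by_cases htx' : tchS (PySem.Set.ofList x) g' = true
                · have hag0 : a ∈ g0.1 := (hE0 a).2 (Or.inr ⟨g', hg'm, htx', ha'⟩)
                  exact ⟨_, List.mem_cons_self .., hheadL,
                    (mem_unionAll a _ _).2 (Or.inr ⟨g0, List.mem_filter_of_mem hg0m hbb, hag0⟩)⟩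
                · have hgmem : g' ∈ (bGroups (l1 ++ x :: l2)).filter (fun g => !tchS (PySem.Set.ofList x) g) := by
                    rw [R1]
                    exact List.mem_filter_of_mem hg'm (by simp [htx'])
                  exact ⟨_, List.mem_cons_self .., hheadL,
                    (mem_unionAll a _ _).2 (Or.inr ⟨g', List.mem_filter_of_mem
                      (List.mem_of_mem_filter hgmem) hty', ha'⟩)⟩
            · have hgm := List.mem_of_mem_filter hgf
              have hag0 : a ∈ g0.1 := (hE0 a).2 (Or.inr ⟨g, hgm, htx, ha⟩)
              exact ⟨_, List.mem_cons_self .., hheadL,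
                (mem_unionAll a _ _).2 (Or.inr ⟨g0, List.mem_filter_of_mem hg0m hbb, hag0⟩)⟩
    · -- y's entry does not touch x's component
      have hC1L : ∀ g ∈ bGroups (l1 ++ x :: l2), tchS (PySem.Set.ofList y) g = true →
          tchS (PySem.Set.ofList x) g = false := by
        intro g hg hty
        by_contra h
        have htx : tchS (PySem.Set.ofList x) g = true := by simpa using h
        rw [hg0uniq g hg htx] at hty
        exact hbb hty
      have hC1R : ∀ g ∈ bGroups (l1 ++ l2), tchS (PySem.Set.ofList y) g = true →
          tchS (PySem.Set.ofList x) g = false := by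
        intro g hg hty
        by_contra h
        have htx : tchS (PySem.Set.ofList x) g = true := by simpa using h
        exact hbb (hTY g hg htx hty)
      have hC2 : (bGroups (l1 ++ x :: l2)).filter (tchS (PySem.Set.ofList y))
          = (bGroups (l1 ++ l2)).filter (tchS (PySem.Set.ofList y)) := by
        have hL : (bGroups (l1 ++ x :: l2)).filter (tchS (PySem.Set.ofList y))
            = ((bGroups (l1 ++ x :: l2)).filter (fun g => !tchS (PySem.Set.ofList x) g)).filter
                (tchS (PySem.Set.ofList y)) := by
          rw [List.filter_filter]
          refine (List.filter_congr ?_)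
          intro g hg
          cases hty : tchS (PySem.Set.ofList y) g
          · simp
          · simp [hC1L g hg hty]
        have hR : (bGroups (l1 ++ l2)).filter (tchS (PySem.Set.ofList y))
            = ((bGroups (l1 ++ l2)).filter (fun g => !tchS (PySem.Set.ofList x) g)).filter
                (tchS (PySem.Set.ofList y)) := by
          rw [List.filter_filter]
          refine (List.filter_congr ?_)
          intro g hg
          cases hty : tchS (PySem.Set.ofList y) g
          · simp
          · simp [hC1R g hg hty]
        rw [hL, hR, R1]
      have hC4 : (bGroups (l1 ++ x :: l2)).any (tchS (PySem.Set.ofList y))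
          = (bGroups (l1 ++ l2)).any (tchS (PySem.Set.ofList y)) := pvAnyOfFilterEq _ _ _ hC2
      have hheadL : tchS (PySem.Set.ofList x)
          (unionAll (PySem.Set.ofList y) ((bGroups (l1 ++ x :: l2)).filter (tchS (PySem.Set.ofList y))),
           (bGroups (l1 ++ x :: l2)).any (tchS (PySem.Set.ofList y)), y) = false := by
        by_contra h
        obtain ⟨a, ha, hax⟩ := (tchS_iff _ _).1 (by simpa using h)
        rcases (mem_unionAll a _ _).1 ha with h1 | ⟨g, hgf, hag⟩
        · exact hbb (hXY ⟨a, (PySem.Set.mem_ofList x a).1 hax, h1⟩)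
        · have hty := List.of_mem_filter hgf
          have hgm := List.mem_of_mem_filter hgf
          have htx : tchS (PySem.Set.ofList x) g = true := (tchS_iff _ _).2 ⟨a, hag, hax⟩
          rw [hC1L g hgm hty] at htx
          cases htx
      have hheadR : tchS (PySem.Set.ofList x)
          (unionAll (PySem.Set.ofList y) ((bGroups (l1 ++ l2)).filter (tchS (PySem.Set.ofList y))),
           (bGroups (l1 ++ l2)).any (tchS (PySem.Set.ofList y)), y) = false := by
        by_contra h
        obtain ⟨a, ha, hax⟩ := (tchS_iff _ _).1 (by simpa using h)
        rcases (mem_unionAll a _ _).1 ha with h1 | ⟨g, hgf, hag⟩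
        · exact hbb (hXY ⟨a, (PySem.Set.mem_ofList x a).1 hax, h1⟩)
        · have hty := List.of_mem_filter hgf
          have hgm := List.mem_of_mem_filter hgf
          have htx : tchS (PySem.Set.ofList x) g = true := (tchS_iff _ _).2 ⟨a, hag, hax⟩
          rw [hC1R g hgm hty] at htx
          cases htx
      constructor
      · rw [List.filter_cons, List.filter_cons]
        rw [if_pos (by simp [hheadL]), if_pos (by simp [hheadR])]
        rw [hC2, hC4]
        congr 1
        rw [pvFilterSwap, R1, pvFilterSwap]
      · intro a
        constructor
        · rintro ⟨g, hg, htx, ha⟩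
          rcases List.mem_cons.1 hg with heq | hgf
          · rw [heq] at htx
            rw [hheadL] at htx
            cases htx
          · have hgm := List.mem_of_mem_filter hgf
            rcases (R2 a).1 ⟨g, hgm, htx, ha⟩ with hax | ⟨g', hg'm, htx', ha'⟩
            · exact Or.inl hax
            · have hty' : tchS (PySem.Set.ofList y) g' = false := by
                cases h : tchS (PySem.Set.ofList y) g'
                · rfl
                · rw [hC1R g' hg'm h] at htx'
                  cases htx'
              exact Or.inr ⟨g', List.mem_cons_of_mem _
                (List.mem_filter_of_mem hg'm (by simp [hty'])), htx', ha'⟩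
        · rintro (hax | ⟨g, hg, htx, ha⟩)
          · have hty0 : tchS (PySem.Set.ofList y) g0 = false := by simpa using hbb
            exact ⟨g0, List.mem_cons_of_mem _ (List.mem_filter_of_mem hg0m (by simp [hty0])),
              hg0tx, hg0sub a hax⟩
          · rcases List.mem_cons.1 hg with heq | hgf
            · rw [heq] at htx
              rw [hheadR] at htx
              cases htx
            · have hgm := List.mem_of_mem_filter hgf
              obtain ⟨g', hg'm, htx', ha'⟩ := (R2 a).2 (Or.inr ⟨g, hgm, htx, ha⟩)
              have heq0 := hg0uniq g' hg'm htx'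
              rw [heq0] at ha'
              have hty0 : tchS (PySem.Set.ofList y) g0 = false := by simpa using hbb
              exact ⟨g0, List.mem_cons_of_mem _ (List.mem_filter_of_mem hg0m (by simp [hty0])),
                hg0tx, ha'⟩

lemma pvSortedCongr (xs ys : List Int) (hx : xs.Nodup) (hy : ys.Nodup)
    (h : ∀ a, a ∈ xs ↔ a ∈ ys) :
    PySem.List.sorted xs (fun v => v) false = PySem.List.sorted ys (fun v => v) false := by
  have hperm : (PySem.List.sorted ys (fun v => v) false).Perm xs :=
    (PySem.List.sorted_perm ys (fun v => v) false).trans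
      ((List.perm_ext_iff_of_nodup hy hx).2 (fun a => (h a).symm))
  have hnd : (PySem.List.sorted ys (fun v => v) false).Nodup := hperm.symm.nodup hx
  have hle := PySem.List.sorted_pairwise ys (fun v => v)
  have hlt : (PySem.List.sorted ys (fun v => v) false).Pairwise (fun a b => a < b) := by
    have := List.Pairwise.and hle hnd
    exact this.imp (fun hab => lt_of_le_of_ne hab.1 hab.2)
  exact PySem.List.sorted_eq_of_perm_of_pairwise_lt xs _ _ hperm hlt

-- a head that shares no element with the remaining items forms its own singleton group
lemma pvSkip (h : List Int) (rest : List (List Int))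
    (hd : ∀ it ∈ rest, ∀ a ∈ it, a ∉ h) :
    bGroups (h :: rest) = (PySem.Set.ofList h, false, h) :: bGroups rest := by
  rw [show bGroups (h :: rest) = bInsert (bGroups rest) h from rfl, bInsert_eq]
  obtain ⟨nod, cov, dis, itm⟩ := bGroups_inv rest
  have hall : ∀ g ∈ bGroups rest, tchS (PySem.Set.ofList h) g = false := by
    intro g hg
    cases ht : tchS (PySem.Set.ofList h) g
    · rfl
    · exfalso
      obtain ⟨a, hag, hah⟩ := (tchS_iff _ _).1 ht
      obtain ⟨it, hit, hait⟩ := cov g hg a hag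
      exact hd it hit a hait ((PySem.Set.mem_ofList h a).1 hah)
  have h1 : (bGroups rest).filter (tchS (PySem.Set.ofList h)) = [] :=
    List.filter_eq_nil_iff.2 (fun g hg => by simp [hall g hg])
  have h2 : (bGroups rest).any (tchS (PySem.Set.ofList h)) = false :=
    List.any_eq_false.2 (fun g hg => by simp [hall g hg])
  have h3 : (bGroups rest).filter (fun g => !tchS (PySem.Set.ofList h) g) = bGroups rest :=
    List.filter_eq_self.2 (fun g hg => by simp [hall g hg])
  rw [h1, h2, h3]
  rfl

-- merging an overlapping later item x into the head is invisible to B's output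
lemma pvMerge (h x : List Int) (l1 l2 : List (List Int)) (b0 : Int)
    (hb0x : b0 ∈ x) (hb0h : b0 ∈ h) :
    (bGroups (h :: (l1 ++ x :: l2))).map bRender
      = (bGroups ((PySem.List.sorted (PySem.Set.union (PySem.Set.ofList x) (PySem.Set.ofList h))
          (fun v => v) false) :: (l1 ++ l2))).map bRender := by
  obtain ⟨R1, R2⟩ := pvRem x b0 hb0x l1 l2
  obtain ⟨nodL, covL, disL, itmL⟩ := bGroups_inv (l1 ++ x :: l2)
  obtain ⟨nodR, covR, disR, itmR⟩ := bGroups_inv (l1 ++ l2)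
  obtain ⟨g0, hg0m, hg0sub, hg0uniq⟩ := touched_unique (l1 ++ x :: l2) x (by simp)
  have hb0sx : b0 ∈ PySem.Set.ofList x := (PySem.Set.mem_ofList x b0).2 hb0x
  have hb0sh : b0 ∈ PySem.Set.ofList h := (PySem.Set.mem_ofList h b0).2 hb0h
  have hg0tx : tchS (PySem.Set.ofList x) g0 = true := (tchS_iff _ _).2 ⟨b0, hg0sub b0 hb0x, hb0sx⟩
  have hg0th : tchS (PySem.Set.ofList h) g0 = true := (tchS_iff _ _).2 ⟨b0, hg0sub b0 hb0x, hb0sh⟩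
  have hE0 : ∀ a, a ∈ g0.1 ↔ (a ∈ x ∨ ∃ g ∈ bGroups (l1 ++ l2), tchS (PySem.Set.ofList x) g = true ∧ a ∈ g.1) := by
    intro a
    constructor
    · intro ha
      exact (R2 a).1 ⟨g0, hg0m, hg0tx, ha⟩
    · intro hr
      obtain ⟨g, hg, htx, ha⟩ := (R2 a).2 hr
      rw [hg0uniq g hg htx] at ha
      exact ha
  -- the merged item and its element set
  have hmmem : ∀ a, a ∈ PySem.Set.ofList
      (PySem.List.sorted (PySem.Set.union (PySem.Set.ofList x) (PySem.Set.ofList h)) (fun v => v) false)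
      ↔ (a ∈ x ∨ a ∈ h) := by
    intro a
    rw [PySem.Set.mem_ofList]
    rw [PySem.List.mem_sorted]
    rw [PySem.Set.mem_union]
    rw [PySem.Set.mem_ofList, PySem.Set.mem_ofList]
  have htximp : ∀ g ∈ bGroups (l1 ++ x :: l2), tchS (PySem.Set.ofList x) g = true →
      tchS (PySem.Set.ofList h) g = true := by
    intro g hg htx
    rw [hg0uniq g hg htx]
    exact hg0th
  have htmiff : ∀ g : PySem.Set Int × Bool × List Int,
      tchS (PySem.Set.ofList (PySem.List.sorted (PySem.Set.union (PySem.Set.ofList x) (PySem.Set.ofList h)) (fun v => v) false)) g = true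
      ↔ (tchS (PySem.Set.ofList h) g = true ∨ tchS (PySem.Set.ofList x) g = true) := by
    intro g
    constructor
    · intro ht
      obtain ⟨a, hag, ham⟩ := (tchS_iff _ _).1 ht
      rcases (hmmem a).1 ham with hax | hah
      · exact Or.inr ((tchS_iff _ _).2 ⟨a, hag, (PySem.Set.mem_ofList x a).2 hax⟩)
      · exact Or.inl ((tchS_iff _ _).2 ⟨a, hag, (PySem.Set.mem_ofList h a).2 hah⟩)
    · rintro (ht | ht)
      · obtain ⟨a, hag, has⟩ := (tchS_iff _ _).1 ht
        exact (tchS_iff _ _).2 ⟨a, hag, (hmmem a).2 (Or.inr ((PySem.Set.mem_ofList h a).1 has))⟩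
      · obtain ⟨a, hag, has⟩ := (tchS_iff _ _).1 ht
        exact (tchS_iff _ _).2 ⟨a, hag, (hmmem a).2 (Or.inl ((PySem.Set.mem_ofList x a).1 has))⟩
  rw [show bGroups (h :: (l1 ++ x :: l2)) = bInsert (bGroups (l1 ++ x :: l2)) h from rfl,
      show bGroups ((PySem.List.sorted (PySem.Set.union (PySem.Set.ofList x) (PySem.Set.ofList h)) (fun v => v) false) :: (l1 ++ l2))
        = bInsert (bGroups (l1 ++ l2)) (PySem.List.sorted (PySem.Set.union (PySem.Set.ofList x) (PySem.Set.ofList h)) (fun v => v) false) from rfl,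
      bInsert_eq, bInsert_eq]
  -- kept groups coincide
  have hkept : (bGroups (l1 ++ x :: l2)).filter (fun g => !tchS (PySem.Set.ofList h) g)
      = (bGroups (l1 ++ l2)).filter (fun g =>
          !tchS (PySem.Set.ofList (PySem.List.sorted (PySem.Set.union (PySem.Set.ofList x) (PySem.Set.ofList h)) (fun v => v) false)) g) := by
    have hL : (bGroups (l1 ++ x :: l2)).filter (fun g => !tchS (PySem.Set.ofList h) g)
        = ((bGroups (l1 ++ x :: l2)).filter (fun g => !tchS (PySem.Set.ofList x) g)).filter
            (fun g => !tchS (PySem.Set.ofList h) g) := by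
      rw [List.filter_filter]
      refine (List.filter_congr ?_)
      intro g hg
      cases hth : tchS (PySem.Set.ofList h) g
      · have htx : tchS (PySem.Set.ofList x) g = false := by
          cases htx : tchS (PySem.Set.ofList x) g
          · rfl
          · rw [htximp g hg htx] at hth
            cases hth
        simp [htx]
      · simp
    have hR : (bGroups (l1 ++ l2)).filter (fun g =>
          !tchS (PySem.Set.ofList (PySem.List.sorted (PySem.Set.union (PySem.Set.ofList x) (PySem.Set.ofList h)) (fun v => v) false)) g)
        = ((bGroups (l1 ++ l2)).filter (fun g => !tchS (PySem.Set.ofList x) g)).filter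
            (fun g => !tchS (PySem.Set.ofList h) g) := by
      rw [List.filter_filter]
      refine (List.filter_congr ?_)
      intro g _
      have hb : tchS (PySem.Set.ofList (PySem.List.sorted (PySem.Set.union (PySem.Set.ofList x) (PySem.Set.ofList h)) (fun v => v) false)) g
          = (tchS (PySem.Set.ofList h) g || tchS (PySem.Set.ofList x) g) := by
        rw [Bool.eq_iff_iff]
        simp only [Bool.or_eq_true]
        exact htmiff g
      rw [hb]
      cases tchS (PySem.Set.ofList h) g <;> cases tchS (PySem.Set.ofList x) g <;> rfl
    rw [hL, hR, R1]
  -- the head flags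
  have hfL : (bGroups (l1 ++ x :: l2)).any (tchS (PySem.Set.ofList h)) = true :=
    List.any_eq_true.2 ⟨g0, hg0m, hg0th⟩
  -- head element sets have the same members
  have hmemhead : ∀ a,
      a ∈ unionAll (PySem.Set.ofList h) ((bGroups (l1 ++ x :: l2)).filter (tchS (PySem.Set.ofList h)))
      ↔ a ∈ unionAll (PySem.Set.ofList (PySem.List.sorted (PySem.Set.union (PySem.Set.ofList x) (PySem.Set.ofList h)) (fun v => v) false))
            ((bGroups (l1 ++ l2)).filter (tchS (PySem.Set.ofList (PySem.List.sorted (PySem.Set.union (PySem.Set.ofList x) (PySem.Set.ofList h)) (fun v => v) false)))) := by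
    intro a
    rw [mem_unionAll, mem_unionAll]
    constructor
    · rintro (hah | ⟨g, hgf, hag⟩)
      · exact Or.inl ((hmmem a).2 (Or.inr ((PySem.Set.mem_ofList h a).1 hah)))
      · have hth := List.of_mem_filter hgf
        have hgm := List.mem_of_mem_filter hgf
        by_cases htx : tchS (PySem.Set.ofList x) g = true
        · have heq0 := hg0uniq g hgm htx
          rw [heq0] at hag
          rcases (hE0 a).1 hag with hax | ⟨g', hg'm, htx', ha'⟩
          · exact Or.inl ((hmmem a).2 (Or.inl hax))
          · exact Or.inr ⟨g', List.mem_filter_of_mem hg'm ((htmiff g').2 (Or.inr htx')), ha'⟩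
        · have htxf : tchS (PySem.Set.ofList x) g = false := by simpa using htx
          have hmem' : g ∈ (bGroups (l1 ++ l2)).filter (fun g => !tchS (PySem.Set.ofList x) g) := by
            rw [← R1]
            exact List.mem_filter_of_mem hgm (by simp [htxf])
          exact Or.inr ⟨g, List.mem_filter_of_mem (List.mem_of_mem_filter hmem')
            ((htmiff g).2 (Or.inl hth)), hag⟩
    · rintro (ham | ⟨g, hgf, hag⟩)
      · rcases (hmmem a).1 ham with hax | hah
        · exact Or.inr ⟨g0, List.mem_filter_of_mem hg0m hg0th, hg0sub a hax⟩
        · exact Or.inl ((PySem.Set.mem_ofList h a).2 hah)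
      · have htm := List.of_mem_filter hgf
        have hgm := List.mem_of_mem_filter hgf
        rcases (htmiff g).1 htm with hth | htx
        · by_cases htx' : tchS (PySem.Set.ofList x) g = true
          · have hag0 : a ∈ g0.1 := (hE0 a).2 (Or.inr ⟨g, hgm, htx', hag⟩)
            exact Or.inr ⟨g0, List.mem_filter_of_mem hg0m hg0th, hag0⟩
          · have htxf : tchS (PySem.Set.ofList x) g = false := by simpa using htx'
            have hmem' : g ∈ (bGroups (l1 ++ x :: l2)).filter (fun g => !tchS (PySem.Set.ofList x) g) := by
              rw [R1]
              exact List.mem_filter_of_mem hgm (by simp [htxf])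
            exact Or.inr ⟨g, List.mem_filter_of_mem (List.mem_of_mem_filter hmem') hth, hag⟩
        · have hag0 : a ∈ g0.1 := (hE0 a).2 (Or.inr ⟨g, hgm, htx, hag⟩)
          exact Or.inr ⟨g0, List.mem_filter_of_mem hg0m hg0th, hag0⟩
  -- now compare the rendered lists
  rw [List.map_cons, List.map_cons, hkept]
  congr 1
  have hndL : (unionAll (PySem.Set.ofList h) ((bGroups (l1 ++ x :: l2)).filter (tchS (PySem.Set.ofList h)))).Nodup :=
    nodup_unionAll _ _ (PySem.Set.nodup_ofList h)
  have hndR : (unionAll (PySem.Set.ofList (PySem.List.sorted (PySem.Set.union (PySem.Set.ofList x) (PySem.Set.ofList h)) (fun v => v) false))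
      ((bGroups (l1 ++ l2)).filter (tchS (PySem.Set.ofList (PySem.List.sorted (PySem.Set.union (PySem.Set.ofList x) (PySem.Set.ofList h)) (fun v => v) false))))).Nodup :=
    nodup_unionAll _ _ (PySem.Set.nodup_ofList _)
  cases hfR : (bGroups (l1 ++ l2)).any (tchS (PySem.Set.ofList (PySem.List.sorted (PySem.Set.union (PySem.Set.ofList x) (PySem.Set.ofList h)) (fun v => v) false)))
  · -- the merged item absorbs nothing on the right: it is rendered verbatim
    have hnone : ∀ g ∈ bGroups (l1 ++ l2),
        tchS (PySem.Set.ofList (PySem.List.sorted (PySem.Set.union (PySem.Set.ofList x) (PySem.Set.ofList h)) (fun v => v) false)) g = false := by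
      intro g hg
      cases ht : tchS (PySem.Set.ofList (PySem.List.sorted (PySem.Set.union (PySem.Set.ofList x) (PySem.Set.ofList h)) (fun v => v) false)) g
      · rfl
      · exact absurd (List.any_eq_true.2 ⟨g, hg, ht⟩) (by simp [hfR])
    have hfil : (bGroups (l1 ++ l2)).filter (tchS (PySem.Set.ofList (PySem.List.sorted (PySem.Set.union (PySem.Set.ofList x) (PySem.Set.ofList h)) (fun v => v) false))) = [] :=
      List.filter_eq_nil_iff.2 (fun g hg => by simp [hnone g hg])
    simp only [bRender, hfL, hfR]
    rw [if_pos trivial, if_neg (by simp)]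
    -- sorted eL = the merged sorted item
    have hun : (PySem.Set.union (PySem.Set.ofList x) (PySem.Set.ofList h)).Nodup :=
      PySem.Set.nodup_union _ _ (PySem.Set.nodup_ofList x)
    have : PySem.List.sorted (unionAll (PySem.Set.ofList h) ((bGroups (l1 ++ x :: l2)).filter (tchS (PySem.Set.ofList h)))) (fun v => v) false
        = PySem.List.sorted (PySem.Set.union (PySem.Set.ofList x) (PySem.Set.ofList h)) (fun v => v) false := by
      apply pvSortedCongr _ _ hndL hun
      intro a
      rw [PySem.Set.mem_union, PySem.Set.mem_ofList, PySem.Set.mem_ofList]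
      rw [(hmemhead a)]
      rw [mem_unionAll, hfil]
      simp [hmmem a, or_comm]
    rw [this]
  · -- the merged item absorbs something on the right: both render a sorted set
    simp only [bRender, hfL, hfR, if_true]
    exact pvSortedCongr _ _ hndL hndR hmemhead

lemma pvOverlap_iff (a b : List Int) :
    pvOverlap a b = true ↔ ∃ v, v ∈ a ∧ v ∈ b := by
  unfold pvOverlap
  constructor
  · intro h
    have hne : PySem.Set.inter (PySem.Set.ofList a) (PySem.Set.ofList b) ≠ [] := by
      simpa [List.isEmpty_iff] using h
    obtain ⟨v, hv⟩ := List.exists_mem_of_ne_nil _ hne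
    have := (PySem.Set.mem_inter (PySem.Set.ofList a) (PySem.Set.ofList b) v).1 hv
    exact ⟨v, (PySem.Set.mem_ofList a v).1 this.1, (PySem.Set.mem_ofList b v).1 this.2⟩
  · rintro ⟨v, hva, hvb⟩
    have : v ∈ PySem.Set.inter (PySem.Set.ofList a) (PySem.Set.ofList b) :=
      (PySem.Set.mem_inter _ _ v).2 ⟨(PySem.Set.mem_ofList a v).2 hva, (PySem.Set.mem_ofList b v).2 hvb⟩
    simp [List.isEmpty_iff]
    intro hc
    simp [hc] at this

-- the scan finds the first overlapping index (and nothing overlaps when it returns none)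
lemma pvFindSome (s : List (List Int)) (j : Int) (hj : 0 ≤ j) (hjlt : j < (s.length : Int)) :
    ∀ (n : Nat) (a i : Int), ((s.length : Int) - a).toNat = n → 0 ≤ a →
      resortFind s j (PySem.List.pyRange a s.length 1) = some i →
      a ≤ i ∧ i < s.length ∧
        (∀ v w, PySem.List.pyGet? s i = some v → PySem.List.pyGet? s j = some w →
          pvOverlap v w = true) ∧
        (∀ k, a ≤ k → k < i → ∀ v w, PySem.List.pyGet? s k = some v →
          PySem.List.pyGet? s j = some w → pvOverlap v w = false) := by
  intro n
  induction n with
  | zero =>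
    intro a i hn ha hfind
    rw [PySem.List.pyRange_one_eq_nil (by omega)] at hfind
    cases hfind
  | succ n ih =>
    intro a i hn ha hfind
    by_cases hlt : a < (s.length : Int)
    · rw [PySem.List.pyRange_one_cons hlt] at hfind
      have hva : PySem.List.pyGet? s a = some (s.get ⟨a.toNat, by omega⟩) := by
        rw [PySem.List.pyGet?_of_nonneg _ ha]
        simp [List.getElem?_eq_getElem (by omega : a.toNat < s.length)]
      have hvj : PySem.List.pyGet? s j = some (s.get ⟨j.toNat, by omega⟩) := by
        rw [PySem.List.pyGet?_of_nonneg _ hj]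
        simp [List.getElem?_eq_getElem (by omega : j.toNat < s.length)]
      rw [resortFind] at hfind
      simp only [hva, hvj] at hfind
      by_cases hov : pvOverlap (s.get ⟨a.toNat, by omega⟩) (s.get ⟨j.toNat, by omega⟩) = true
      · rw [if_pos hov] at hfind
        injection hfind with hfi
        subst hfi
        refine ⟨le_refl _, hlt, ?_, ?_⟩
        · intro v w hv hw
          rw [hva] at hv
          rw [hvj] at hw
          injection hv with hv
          injection hw with hw
          rw [← hv, ← hw]
          exact hov
        · intro k hk1 hk2
          omega
      · rw [if_neg hov] at hfind
        obtain ⟨h1, h2, h3, h4⟩ := ih (a + 1) i (by omega) (by omega) hfind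
        refine ⟨by omega, h2, h3, ?_⟩
        intro k hk1 hk2 v w hv hw
        by_cases hka : k = a
        · subst hka
          rw [hva] at hv
          rw [hvj] at hw
          injection hv with hv
          injection hw with hw
          rw [← hv, ← hw]
          simpa using hov
        · exact h4 k (by omega) hk2 v w hv hw
    · rw [PySem.List.pyRange_one_eq_nil (by omega)] at hfind
      cases hfind

lemma pvFindNone (s : List (List Int)) (j : Int) (hj : 0 ≤ j) (hjlt : j < (s.length : Int)) :
    ∀ (n : Nat) (a : Int), ((s.length : Int) - a).toNat = n → 0 ≤ a →
      resortFind s j (PySem.List.pyRange a s.length 1) = none →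
      (∀ k, a ≤ k → k < s.length → ∀ v w, PySem.List.pyGet? s k = some v →
        PySem.List.pyGet? s j = some w → pvOverlap v w = false) := by
  intro n
  induction n with
  | zero =>
    intro a hn ha _ k hk1 hk2
    omega
  | succ n ih =>
    intro a hn ha hfind k hk1 hk2 v w hv hw
    by_cases hlt : a < (s.length : Int)
    · rw [PySem.List.pyRange_one_cons hlt] at hfind
      have hva : PySem.List.pyGet? s a = some (s.get ⟨a.toNat, by omega⟩) := by
        rw [PySem.List.pyGet?_of_nonneg _ ha]
        simp [List.getElem?_eq_getElem (by omega : a.toNat < s.length)]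
      have hvj : PySem.List.pyGet? s j = some (s.get ⟨j.toNat, by omega⟩) := by
        rw [PySem.List.pyGet?_of_nonneg _ hj]
        simp [List.getElem?_eq_getElem (by omega : j.toNat < s.length)]
      rw [resortFind] at hfind
      simp only [hva, hvj] at hfind
      by_cases hov : pvOverlap (s.get ⟨a.toNat, by omega⟩) (s.get ⟨j.toNat, by omega⟩) = true
      · rw [if_pos hov] at hfind
        cases hfind
      · rw [if_neg hov] at hfind
        by_cases hka : k = a
        · subst hka
          rw [hva] at hv
          rw [hvj] at hw
          injection hv with hv
          injection hw with hw
          rw [← hv, ← hw]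
          simpa using hov
        · exact ih (a + 1) (by omega) (by omega) hfind k (by omega) hk2 v w hv hw
    · omega

-- resort_alt computed through bGroups
lemma pvBridge (s : List (List Int)) (j : Int) (hj : 0 ≤ j) :
    resort_alt s j = s.take j.toNat ++ (bGroups (s.drop j.toNat)).map bRender := by
  unfold resort_alt
  by_cases hle : (s.length : Int) - 1 ≤ j
  · rw [if_pos hle]
    have hlen : (s.drop j.toNat).length ≤ 1 := by
      rw [List.length_drop]
      omega
    have hone : (bGroups (s.drop j.toNat)).map bRender = s.drop j.toNat := by
      cases hd : s.drop j.toNat with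
      | nil => rfl
      | cons a t =>
        cases t with
        | nil => rfl
        | cons b u =>
          exfalso
          rw [hd] at hlen
          simp at hlen
    rw [hone, List.take_append_drop]
  · rw [if_neg hle]
    simp only
    rw [PySem.List.slice_from s hj, PySem.List.slice_to s hj, List.foldl_reverse]
    rfl

-- the main equivalence, by induction along A's recursion
lemma pvMain : ∀ (s : List (List Int)) (j : Int), 0 ≤ j → resort s j = resort_alt s j := by
  intro s j
  induction s, j using resort.induct with
  | case1 s j hle =>
    intro _
    rw [resort.eq_def, if_pos hle]
    unfold resort_alt
    rw [if_pos hle]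
  | case2 s j hle i hfind xs₁ hpop hjv hget ih =>
    intro hj
    have hjlt : j < (s.length : Int) := by omega
    obtain ⟨hi1, hi2, hov, _⟩ := pvFindSome s j hj hjlt _ (j + 1) i rfl (by omega) hfind
    have hiI : i = ((i.toNat : Nat) : Int) := (Int.toNat_of_nonneg (by omega)).symm
    have hIlt : i.toNat < s.length := by omega
    have hJlt : j.toNat < s.length := by omega
    have hJI : j.toNat < i.toNat := by omega
    rw [hiI, PySem.List.pop?_natCast s i.toNat hIlt] at hpop
    injection hpop with hpop
    subst hpop
    have hgetJ : PySem.List.pyGet? ((s[i.toNat], s.eraseIdx i.toNat) : List Int × List (List Int)).2 j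
        = some s[j.toNat] := by
      rw [PySem.List.pyGet?_of_nonneg _ hj]
      simp only
      rw [List.getElem?_eraseIdx_of_lt hJI, List.getElem?_eq_getElem hJlt]
    rw [hgetJ] at hget
    injection hget with hget
    subst hget
    have hovb : pvOverlap s[i.toNat] s[j.toNat] = true := by
      apply hov
      · rw [PySem.List.pyGet?_of_nonneg _ (by omega : (0:Int) ≤ i)]
        simp [List.getElem?_eq_getElem hIlt]
      · rw [PySem.List.pyGet?_of_nonneg _ hj]
        simp [List.getElem?_eq_getElem hJlt]
    obtain ⟨b0, hb0x, hb0h⟩ := (pvOverlap_iff _ _).1 hovb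
    -- unfold one step of A
    rw [resort.eq_def, if_neg hle]
    split
    · rename_i i' heq
      have hii' : i' = i := by
        rw [hfind] at heq
        injection heq with h
        exact h.symm
      rw [hii', hiI, PySem.List.pop?_natCast s i.toNat hIlt]
      simp only
      rw [hgetJ]
      simp only
      -- the recursive call
      rw [ih hj, pvBridge _ j hj, pvBridge s j hj]
      -- list surgery
      have hsetIdx : pvSetIdx (s.eraseIdx i.toNat) j
          (PySem.List.sorted (PySem.Set.union (PySem.Set.ofList s[i.toNat]) (PySem.Set.ofList s[j.toNat])) (fun v => v) false)
          = (s.eraseIdx i.toNat).set j.toNat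
            (PySem.List.sorted (PySem.Set.union (PySem.Set.ofList s[i.toNat]) (PySem.Set.ofList s[j.toNat])) (fun v => v) false) := by
        unfold pvSetIdx
        rw [if_pos hj]
      rw [hsetIdx]
      have hErLen : j.toNat < (s.eraseIdx i.toNat).length := by
        rw [List.length_eraseIdx_of_lt hIlt]
        omega
      have hEr : s.eraseIdx i.toNat = s.take i.toNat ++ s.drop (i.toNat + 1) :=
        List.eraseIdx_eq_take_drop_succ s i.toNat
      have hTakeJEr : (s.eraseIdx i.toNat).take j.toNat = s.take j.toNat := by
        rw [hEr, List.take_append_of_le_length (by simp; omega), List.take_take,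
          Nat.min_eq_left (by omega)]
      have hDropJ1Er : (s.eraseIdx i.toNat).drop (j.toNat + 1)
          = (s.drop (j.toNat + 1)).take (i.toNat - j.toNat - 1) ++ s.drop (i.toNat + 1) := by
        rw [hEr, List.drop_append_of_le_length (by simp; omega), List.drop_take]
        have harith : i.toNat - (j.toNat + 1) = i.toNat - j.toNat - 1 := by omega
        rw [harith]
      have hSet : (s.eraseIdx i.toNat).set j.toNat
            (PySem.List.sorted (PySem.Set.union (PySem.Set.ofList s[i.toNat]) (PySem.Set.ofList s[j.toNat])) (fun v => v) false)
          = (s.eraseIdx i.toNat).take j.toNat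
            ++ (PySem.List.sorted (PySem.Set.union (PySem.Set.ofList s[i.toNat]) (PySem.Set.ofList s[j.toNat])) (fun v => v) false)
              :: (s.eraseIdx i.toNat).drop (j.toNat + 1) := by
        rw [List.set_eq_take_append_cons_drop, if_pos hErLen]
      have hTake2 : (((s.eraseIdx i.toNat).set j.toNat
            (PySem.List.sorted (PySem.Set.union (PySem.Set.ofList s[i.toNat]) (PySem.Set.ofList s[j.toNat])) (fun v => v) false))).take j.toNat
          = s.take j.toNat := by
        rw [hSet, List.take_append_of_le_length (by simp [List.length_take]; omega),
          List.take_take, Nat.min_self, hTakeJEr]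
      have hDrop2 : (((s.eraseIdx i.toNat).set j.toNat
            (PySem.List.sorted (PySem.Set.union (PySem.Set.ofList s[i.toNat]) (PySem.Set.ofList s[j.toNat])) (fun v => v) false))).drop j.toNat
          = (PySem.List.sorted (PySem.Set.union (PySem.Set.ofList s[i.toNat]) (PySem.Set.ofList s[j.toNat])) (fun v => v) false)
            :: ((s.drop (j.toNat + 1)).take (i.toNat - j.toNat - 1) ++ s.drop (i.toNat + 1)) := by
        rw [hSet, List.drop_left' (by rw [List.length_take]; exact Nat.min_eq_left (by omega)),
          hDropJ1Er]
      have hDropS : s.drop j.toNat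
          = s[j.toNat] :: ((s.drop (j.toNat + 1)).take (i.toNat - j.toNat - 1)
              ++ s[i.toNat] :: s.drop (i.toNat + 1)) := by
        rw [List.drop_eq_getElem_cons hJlt]
        congr 1
        have h1 : s.drop (j.toNat + 1)
            = (s.drop (j.toNat + 1)).take (i.toNat - j.toNat - 1)
              ++ (s.drop (j.toNat + 1)).drop (i.toNat - j.toNat - 1) :=
          (List.take_append_drop _ _).symm
        have h2 : j.toNat + 1 + (i.toNat - j.toNat - 1) = i.toNat := by omega
        conv_lhs => rw [h1]
        rw [List.drop_drop, h2, List.drop_eq_getElem_cons hIlt]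
      rw [hTake2, hDrop2, hDropS]
      exact congrArg (s.take j.toNat ++ ·)
        (pvMerge s[j.toNat] s[i.toNat] _ _ b0 hb0x hb0h).symm
    · rename_i heq
      rw [hfind] at heq
      cases heq
  | case3 s j hle i hfind xs₁ hpop hget =>
    intro hj
    exfalso
    have hjlt : j < (s.length : Int) := by omega
    obtain ⟨hi1, hi2, _, _⟩ := pvFindSome s j hj hjlt _ (j + 1) i rfl (by omega) hfind
    have hiI : i = ((i.toNat : Nat) : Int) := (Int.toNat_of_nonneg (by omega)).symm
    have hIlt : i.toNat < s.length := by omega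
    rw [hiI, PySem.List.pop?_natCast s i.toNat hIlt] at hpop
    injection hpop with hpop
    subst hpop
    rw [PySem.List.pyGet?_of_nonneg _ hj] at hget
    simp only at hget
    rw [List.getElem?_eraseIdx_of_lt (by omega), List.getElem?_eq_getElem (by omega : j.toNat < s.length)] at hget
    cases hget
  | case4 s j hle i hfind hpop =>
    intro hj
    exfalso
    have hjlt : j < (s.length : Int) := by omega
    obtain ⟨hi1, hi2, _, _⟩ := pvFindSome s j hj hjlt _ (j + 1) i rfl (by omega) hfind
    have hiI : i = ((i.toNat : Nat) : Int) := (Int.toNat_of_nonneg (by omega)).symm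
    have hIlt : i.toNat < s.length := by omega
    rw [hiI, PySem.List.pop?_natCast s i.toNat hIlt] at hpop
    cases hpop
  | case5 s j hle hfind ih =>
    intro hj
    have hjlt : j < (s.length : Int) := by omega
    have hJlt : j.toNat < s.length := by omega
    have hnone := pvFindNone s j hj hjlt _ (j + 1) rfl (by omega) hfind
    rw [resort.eq_def, if_neg hle]
    split
    · rename_i i' heq
      rw [hfind] at heq
      cases heq
    · rw [ih (by omega), pvBridge s (j + 1) (by omega), pvBridge s j hj]
      have hJ1 : (j + 1).toNat = j.toNat + 1 := by omega
      rw [hJ1]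
      have hd : s.drop j.toNat = s[j.toNat] :: s.drop (j.toNat + 1) :=
        List.drop_eq_getElem_cons hJlt
      have hcond : ∀ it ∈ s.drop (j.toNat + 1), ∀ a ∈ it, a ∉ s[j.toNat] := by
        intro it hit a hait hah
        obtain ⟨k, hk, hkeq⟩ := List.mem_iff_getElem.1 hit
        have hklen : j.toNat + 1 + k < s.length := by
          rw [List.length_drop] at hk
          omega
        have hget1 : PySem.List.pyGet? s ((j.toNat + 1 + k : Nat) : Int) = some s[j.toNat + 1 + k] := by
          rw [PySem.List.pyGet?_of_nonneg _ (by omega : (0:Int) ≤ ((j.toNat + 1 + k : Nat) : Int))]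
          have hidx : ((j.toNat + 1 + k : Nat) : Int).toNat = j.toNat + 1 + k := by omega
          rw [hidx, List.getElem?_eq_getElem hklen]
        have hget2 : PySem.List.pyGet? s j = some s[j.toNat] := by
          rw [PySem.List.pyGet?_of_nonneg _ hj]
          simp [List.getElem?_eq_getElem hJlt]
        have hfalse := hnone ((j.toNat + 1 + k : Nat) : Int) (by omega) (by exact_mod_cast hklen)
          _ _ hget1 hget2
        have : pvOverlap s[j.toNat + 1 + k] s[j.toNat] = true := by
          apply (pvOverlap_iff _ _).2
          refine ⟨a, ?_, hah⟩
          rw [← List.getElem_drop (i := j.toNat + 1) (j := k) (h := hk)] at *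
          rw [hkeq]
          exact hait
        rw [hfalse] at this
        cases this
      rw [hd, pvSkip s[j.toNat] _ hcond]
      have htk : s.take (j.toNat + 1) = s.take j.toNat ++ [s[j.toNat]] := by
        rw [List.take_succ]
        simp [List.getElem?_eq_getElem hJlt]
      rw [htk, List.append_assoc]
      rfl

-- ===== VERDICT (by name: the statement is the Claim_ definition above) =====
theorem resort_spec : Claim_equal_resort := by
  intro source_id j _ hpre
  unfold Spec_resort
  exact pvMain source_id j hpre
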